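-- pv_equiv track=rewrite | github.com/pinkittys/pfc-mvp | legacy/scripts/clean_spreadsheet_flower_ids.py | clean_flower_id
-- ===== SOURCE A (Python) =====
-- def clean_flower_id(flower_id: str) -> str:
--     """flower_id에서 불필요한 점(.) 제거"""
--     if not flower_id:
--         return flower_id
--
--     # 점(.) 제거
--     cleaned = flower_id.replace('.', '')
--
--     # 연속된 하이픈 정리
--     while '--' in cleaned:
--         cleaned = cleaned.replace('--', '-')
--
--     # 양 끝 하이픈 제거
--     cleaned = cleaned.strip('-')
--
--     return cleaned
-- ===== SOURCE B (Python) =====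
-- def clean_flower_id(flower_id: str) -> str:
--     """Single left-to-right pass: drop dots, emit a hyphen only when the
--     previously emitted character is not a hyphen; finally strip edge hyphens."""
--     out = []
--     for ch in flower_id:
--         if ch == '.':
--             continue
--         if ch == '-' and out and out[-1] == '-':
--             continue
--         out.append(ch)
--     return ''.join(out).strip('-')
-- ===== Notes on version B (the rewrite author's own statement) =====
-- stated objective: alternative
-- what changed: Replaces A's repeated '--'->'-' replace-until-fixpoint loop (plus a separate dot-removal pass) with a single left-to-right character pass that skips dots and collapses hyphen runs by remembering the last emitted character, then strips edge hyphens.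
import Mathlib
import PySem

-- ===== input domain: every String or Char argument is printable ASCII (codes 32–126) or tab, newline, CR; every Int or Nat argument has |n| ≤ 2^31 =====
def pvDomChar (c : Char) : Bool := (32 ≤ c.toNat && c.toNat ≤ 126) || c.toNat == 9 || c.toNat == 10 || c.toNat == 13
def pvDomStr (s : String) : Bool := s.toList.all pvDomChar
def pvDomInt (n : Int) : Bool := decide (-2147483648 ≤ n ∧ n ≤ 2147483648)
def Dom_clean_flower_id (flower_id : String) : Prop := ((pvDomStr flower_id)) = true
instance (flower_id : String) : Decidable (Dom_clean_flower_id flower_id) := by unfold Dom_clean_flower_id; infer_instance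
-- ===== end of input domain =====

-- B replaces A's replace-until-fixpoint hyphen collapsing (plus a separate dot-removal
-- pass) by one left-to-right pass remembering the last emitted character (objective: alternative).

-- ===== PORT A =====
-- "while '--' in cleaned: cleaned = cleaned.replace('--', '-')" — fuel-guarded loop;
-- fuel = current length is enough because each executed replace strictly shortens the string.
def cleanLoop : Nat → List Char → List Char
  | 0, l => l
  | fuel + 1, l =>
    if PySem.Chars.isIn ['-', '-'] l then
      cleanLoop fuel (PySem.Chars.replace l ['-', '-'] ['-'])
    else l

def clean_flower_id (flower_id : String) : String :=
  if flower_id = "" then flower_id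
  else
    let cleaned := PySem.Chars.replace flower_id.toList ['.'] []
    let cleaned := cleanLoop cleaned.length cleaned
    String.ofList (PySem.Chars.stripChars cleaned ['-'])

-- ===== PORT B =====
def clean_flower_id_alt (flower_id : String) : String :=
  let out := flower_id.toList.foldl
    (fun out ch =>
      if ch = '.' then out
      else if ch = '-' ∧ out.getLast? = some '-' then out
      else out ++ [ch]) []
  String.ofList (PySem.Chars.stripChars out ['-'])

-- ===== PRECONDITION & SPEC =====
def Spec_clean_flower_id (flower_id : String) (out : String) : Prop := out = clean_flower_id_alt flower_id
instance (flower_id : String) (out : String) : Decidable (Spec_clean_flower_id flower_id out) := by unfold Spec_clean_flower_id; infer_instance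

-- ===== CLAIM (what is proved, stated in full; the proofs are below) =====
def Claim_equal_clean_flower_id : Prop := ∀ (flower_id : String), Dom_clean_flower_id flower_id → Spec_clean_flower_id flower_id (clean_flower_id flower_id)

-- ===== LEMMAS AND PROOFS =====

-- canonical hyphen-run collapse (proof-side reference function)
def squeeze : List Char → List Char
  | [] => []
  | [c] => [c]
  | a :: b :: t => if a = '-' ∧ b = '-' then squeeze (b :: t) else a :: squeeze (b :: t)

-- what one full Python pass  s.replace('--', '-')  computes
def repHyp : List Char → List Char
  | [] => []
  | [c] => [c]
  | a :: b :: t => if a = '-' ∧ b = '-' then '-' :: repHyp t else a :: repHyp (b :: t)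

lemma head?_repHyp (l : List Char) : (repHyp l).head? = l.head? := by
  induction l using repHyp.induct with
  | case1 => rfl
  | case2 => rfl
  | case3 a b t h ih =>
      obtain ⟨ha, hb⟩ := h; subst ha hb; simp [repHyp]
  | case4 a b t h ih => simp [repHyp, h]

lemma squeeze_cons_congr (a : Char) {x y : List Char} (hh : x.head? = y.head?)
    (hs : squeeze x = squeeze y) : squeeze (a :: x) = squeeze (a :: y) := by
  cases x with
  | nil =>
    cases y with
    | nil => rfl
    | cons d ys => simp at hh
  | cons c xs =>
    cases y with
    | nil => simp at hh
    | cons d ys =>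
      obtain rfl : c = d := by simpa using hh
      show (if a = '-' ∧ c = '-' then squeeze (c :: xs) else a :: squeeze (c :: xs))
        = (if a = '-' ∧ c = '-' then squeeze (c :: ys) else a :: squeeze (c :: ys))
      rw [hs]

lemma squeeze_repHyp (l : List Char) : squeeze (repHyp l) = squeeze l := by
  induction l using repHyp.induct with
  | case1 => rfl
  | case2 => rfl
  | case3 a b t h ih =>
      obtain ⟨ha, hb⟩ := h; subst ha hb
      rw [repHyp, if_pos ⟨rfl, rfl⟩]
      calc squeeze ('-' :: repHyp t) = squeeze ('-' :: t) :=
            squeeze_cons_congr '-' (head?_repHyp t) ih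
        _ = squeeze ('-' :: '-' :: t) := by simp [squeeze]
  | case4 a b t h ih =>
      rw [repHyp, if_neg h]
      exact squeeze_cons_congr a (head?_repHyp (b :: t)) ih

lemma length_repHyp_le (l : List Char) : (repHyp l).length ≤ l.length := by
  induction l using repHyp.induct with
  | case1 => simp [repHyp]
  | case2 => simp [repHyp]
  | case3 a b t h ih => simp only [repHyp, if_pos h, List.length_cons]; omega
  | case4 a b t h ih =>
      simp only [repHyp, if_neg h, List.length_cons] at ih ⊢; omega

lemma length_repHyp_lt (l : List Char) (h : ['-', '-'] <:+: l) :
    (repHyp l).length < l.length := by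
  induction l using repHyp.induct with
  | case1 => simp at h
  | case2 c =>
      have := h.length_le; simp at this
  | case3 a b t hab ih =>
      have := length_repHyp_le t
      simp only [repHyp, if_pos hab, List.length_cons]; omega
  | case4 a b t hab ih =>
      have h2 : ['-', '-'] <:+: b :: t := by
        rcases (List.infix_cons_iff).1 h with hp | hin
        · exfalso
          obtain ⟨s, hs⟩ := hp
          injection hs with h1 hs2
          injection hs2 with h2 _
          exact hab ⟨h1.symm, h2.symm⟩
        · exact hin
      have h3 := ih h2
      simp only [repHyp, if_neg hab, List.length_cons] at h3 ⊢; omega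

lemma squeeze_of_not_infix (l : List Char) (h : ¬ ['-', '-'] <:+: l) : squeeze l = l := by
  induction l using squeeze.induct with
  | case1 => rfl
  | case2 => rfl
  | case3 a b t hab ih =>
      exfalso; apply h
      obtain ⟨ha, hb⟩ := hab; subst ha hb
      exact ⟨[], t, rfl⟩
  | case4 a b t hab ih =>
      have hbt : ¬ ['-', '-'] <:+: b :: t := fun hin =>
        h (hin.trans (List.suffix_cons a (b :: t)).isInfix)
      rw [squeeze, if_neg hab, ih hbt]

lemma replace_dot (l : List Char) :
    PySem.Chars.replace l ['.'] [] = l.filter (· ≠ '.') := by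
  have go_dot : ∀ (fuel : Nat) (m acc : List Char), m.length ≤ fuel →
      PySem.Chars.replace.go ['.'] [] fuel m acc = acc.reverse ++ m.filter (· ≠ '.') := by
    intro fuel
    induction fuel with
    | zero =>
      intro m acc h
      obtain rfl : m = [] := List.eq_nil_of_length_eq_zero (Nat.le_zero.1 h)
      simp [PySem.Chars.replace.go]
    | succ fuel ih =>
      intro m acc h
      cases m with
      | nil => simp [PySem.Chars.replace.go]
      | cons c t =>
        simp only [PySem.Chars.replace.go]
        by_cases hc : c = '.'
        · subst hc
          rw [if_pos (by simp [List.isPrefixOf])]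
          rw [show List.drop (['.'] : List Char).length ('.' :: t) = t from rfl,
              show ([] : List Char).reverse ++ acc = acc from by simp]
          rw [ih t acc (by simpa using Nat.le_of_succ_le_succ h)]
          simp
        · rw [if_neg (by simp [List.isPrefixOf]; intro h'; exact hc h'.symm)]
          rw [ih t (c :: acc) (by simpa using Nat.le_of_succ_le_succ h)]
          simp [hc]
  show PySem.Chars.replace l ['.'] [] = _
  rw [PySem.Chars.replace]
  rw [if_neg (by simp)]
  rw [go_dot l.length l [] le_rfl]
  simp

lemma replace_hyp (l : List Char) :
    PySem.Chars.replace l ['-', '-'] ['-'] = repHyp l := by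
  have go_hyp : ∀ (fuel : Nat) (m acc : List Char), m.length ≤ fuel →
      PySem.Chars.replace.go ['-', '-'] ['-'] fuel m acc = acc.reverse ++ repHyp m := by
    intro fuel
    induction fuel with
    | zero =>
      intro m acc h
      obtain rfl : m = [] := List.eq_nil_of_length_eq_zero (Nat.le_zero.1 h)
      simp [PySem.Chars.replace.go, repHyp]
    | succ fuel ih =>
      intro m acc h
      cases m with
      | nil => simp [PySem.Chars.replace.go, repHyp]
      | cons a t =>
        simp only [PySem.Chars.replace.go]
        cases t with
        | nil =>
          rw [if_neg (by simp [List.isPrefixOf])]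
          cases fuel with
          | zero => simp [PySem.Chars.replace.go, repHyp]
          | succ fuel => simp [PySem.Chars.replace.go, repHyp]
        | cons b t' =>
          by_cases hab : a = '-' ∧ b = '-'
          · obtain ⟨rfl, rfl⟩ := hab
            rw [if_pos (by simp [List.isPrefixOf])]
            simp only [List.length_cons] at h
            rw [show List.drop (['-', '-'] : List Char).length ('-' :: '-' :: t') = t' from rfl]
            rw [ih t' (['-'].reverse ++ acc) (by omega)]
            simp [repHyp]
          · rw [if_neg (by
              simp only [List.isPrefixOf, Bool.and_eq_true, beq_iff_eq]
              intro hx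
              exact hab ⟨hx.1.symm, hx.2.1.symm⟩)]
            simp only [List.length_cons] at h
            rw [ih (b :: t') (a :: acc) (by simp; omega)]
            simp [repHyp, hab]
  show PySem.Chars.replace l ['-', '-'] ['-'] = _
  rw [PySem.Chars.replace]
  rw [if_neg (by simp)]
  rw [go_hyp l.length l [] le_rfl]
  simp

lemma cleanLoop_eq_squeeze (fuel : Nat) (l : List Char) (h : l.length ≤ fuel) :
    cleanLoop fuel l = squeeze l := by
  induction fuel generalizing l with
  | zero =>
    obtain rfl : l = [] := List.eq_nil_of_length_eq_zero (Nat.le_zero.1 h)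
    rfl
  | succ fuel ih =>
    by_cases hin : PySem.Chars.isIn ['-', '-'] l = true
    · have hinf := (PySem.Chars.isIn_iff_infix _ _).1 hin
      rw [cleanLoop, if_pos hin, replace_hyp]
      have hlt := length_repHyp_lt l hinf
      rw [ih (repHyp l) (by omega), squeeze_repHyp]
    · rw [cleanLoop, if_neg hin]
      exact (squeeze_of_not_infix l ((PySem.Chars.isIn_eq_false_iff _ _).1
        (Bool.eq_false_iff.2 hin))).symm

-- B-side: the fold as a structural recursion remembering the last emitted character
def sq2 (p : Option Char) : List Char → List Char
  | [] => []
  | c :: t =>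
    if c = '.' then sq2 p t
    else if c = '-' ∧ p = some '-' then sq2 p t
    else c :: sq2 (some c) t

lemma foldl_eq_sq2 (l : List Char) (acc : List Char) :
    l.foldl (fun out ch =>
      if ch = '.' then out
      else if ch = '-' ∧ out.getLast? = some '-' then out
      else out ++ [ch]) acc = acc ++ sq2 acc.getLast? l := by
  induction l generalizing acc with
  | nil => simp [sq2]
  | cons c t ih =>
    simp only [List.foldl_cons]
    by_cases hc : c = '.'
    · subst hc
      rw [if_pos rfl]
      rw [ih acc]
      simp [sq2]
    · rw [if_neg hc]
      by_cases hd : c = '-' ∧ acc.getLast? = some '-'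
      · rw [if_pos hd, ih acc]
        congr 1
        rw [sq2, if_neg hc, if_pos ⟨hd.1, hd.2⟩]
      · rw [if_neg hd, ih (acc ++ [c])]
        rw [List.getLast?_concat]
        rw [sq2, if_neg hc]
        by_cases hda : c = '-' ∧ acc.getLast? = some '-'
        · exact absurd hda hd
        · rw [if_neg (by
            intro hx
            exact hd ⟨hx.1, by rw [hx.2]⟩)]
          simp

lemma sq2_eq_squeeze (l : List Char) :
    sq2 none l = squeeze (l.filter (· ≠ '.')) := by
  have pair : ∀ (m : List Char) (c : Char),
      c :: sq2 (some c) m = squeeze (c :: m.filter (· ≠ '.')) := by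
    intro m
    induction m with
    | nil => intro c; rfl
    | cons x t ih =>
      intro c
      by_cases hx : x = '.'
      · subst hx
        rw [sq2, if_pos rfl]
        simpa using ih c
      · rw [sq2, if_neg hx]
        by_cases hxc : x = '-' ∧ (some c : Option Char) = some '-'
        · obtain ⟨rfl, hc⟩ := hxc
          obtain rfl : c = '-' := by simpa using hc
          rw [if_pos ⟨rfl, rfl⟩]
          rw [List.filter_cons_of_pos (by simp [hx])]
          rw [show squeeze ('-' :: '-' :: t.filter (· ≠ '.')) = squeeze ('-' :: t.filter (· ≠ '.')) from by simp [squeeze]]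
          exact ih '-'
        · rw [if_neg hxc]
          rw [List.filter_cons_of_pos (by simp [hx])]
          rw [show squeeze (c :: x :: t.filter (· ≠ '.')) = c :: squeeze (x :: t.filter (· ≠ '.')) from by
            rw [squeeze, if_neg (fun hy => hxc ⟨hy.2, by rw [hy.1]⟩)]]
          rw [ih x]
  induction l with
  | nil => rfl
  | cons x t ih =>
    by_cases hx : x = '.'
    · subst hx
      rw [sq2, if_pos rfl]
      simpa using ih
    · rw [sq2, if_neg hx, if_neg (by simp)]
      rw [List.filter_cons_of_pos (by simp [hx])]
      exact pair t x

-- ===== VERDICT (by name: the statement is the Claim_ definition above) =====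
theorem clean_flower_id_spec : Claim_equal_clean_flower_id := by
  intro fid _
  unfold Spec_clean_flower_id clean_flower_id clean_flower_id_alt
  by_cases hemp : fid = ""
  · subst hemp
    rfl
  · rw [if_neg hemp]
    simp only []
    rw [replace_dot]
    rw [cleanLoop_eq_squeeze _ _ le_rfl]
    rw [foldl_eq_sq2, List.nil_append]
    rw [show ([] : List Char).getLast? = none from rfl]
    rw [sq2_eq_squeeze]
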